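-- pv_equiv track=rewrite | github.com/Satyam-2001/My-Codes | python project/other/sub_array.py | Child
-- ===== SOURCE A (Python) =====
-- Arr = [0, 1, 2, 2, 3, 5]
--
-- def Child(root):
--     child = []
--     for i in range(len(Arr)):
--         if Arr[i] == root:
--             child.append(i+1)
--             if len(child) == 2:
--                 return child
--     return child
-- ===== SOURCE B (Python) =====
-- Arr = [0, 1, 2, 2, 3, 5]
--
-- _idx = {}
-- for _i, _v in enumerate(Arr):
--     _idx.setdefault(_v, []).append(_i + 1)
--
-- def Child(root):
--     return _idx.get(root, [])[:2]
-- ===== Notes on version B (the rewrite author's own statement) =====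
-- stated objective: idiomatic
-- what changed: Replaces the per-call linear scan with early exit by a module-level precomputed value-to-indices table; Child becomes a single dict lookup sliced to the first two indices, with no loop or branch at call time.
import Mathlib
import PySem

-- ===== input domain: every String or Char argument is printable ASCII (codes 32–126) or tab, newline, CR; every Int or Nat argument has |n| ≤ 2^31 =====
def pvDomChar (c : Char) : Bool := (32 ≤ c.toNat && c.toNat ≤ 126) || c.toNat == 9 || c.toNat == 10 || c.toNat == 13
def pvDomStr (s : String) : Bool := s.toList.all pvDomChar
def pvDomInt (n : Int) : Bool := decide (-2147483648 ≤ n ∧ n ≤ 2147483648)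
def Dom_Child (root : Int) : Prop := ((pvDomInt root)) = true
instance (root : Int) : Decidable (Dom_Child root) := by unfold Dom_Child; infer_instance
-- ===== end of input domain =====

-- B replaces A's per-call scan with a module-level index table; Child is one lookup plus a [:2] slice.

-- ===== PORT A =====
def ArrA : List Int := [0, 1, 2, 2, 3, 5]

-- the for-loop over range(len(Arr)) with the early return at len(child) == 2
def childGo (root : Int) (child : List Int) : List Int → List Int
  | [] => child
  | i :: rest =>
    match PySem.List.pyGet? ArrA i with
    | some v =>
      if v = root then
        let child' := child ++ [i + 1]
        if child'.length = 2 then child' else childGo root child' rest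
      else childGo root child rest
    | none => child  -- IndexError: unreachable, i ranges over valid indices

def Child (root : Int) : List Int :=
  childGo root [] (PySem.List.pyRange 0 (Int.ofNat ArrA.length) 1)

-- ===== PORT B =====
def ArrB : List Int := [0, 1, 2, 2, 3, 5]

-- the module-level loop: _idx.setdefault(_v, []).append(_i + 1)
def idxTable : PySem.Dict Int (List Int) :=
  (PySem.List.enumerate ArrB 0).foldl
    (fun d p => d.insert p.2 (d.getD p.2 [] ++ [p.1 + 1])) PySem.Dict.empty

def Child_alt (root : Int) : List Int :=
  PySem.List.slice (idxTable.getD root []) none (some 2)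

-- ===== PRECONDITION & SPEC =====
def Spec_Child (root : Int) (out : List Int) : Prop := out = Child_alt root
instance (root : Int) (out : List Int) : Decidable (Spec_Child root out) := by unfold Spec_Child; infer_instance

-- ===== CLAIM (what is proved, stated in full; the proofs are below) =====
def Claim_equal_Child : Prop := ∀ (root : Int), Dom_Child root → Spec_Child root (Child root)

-- ===== LEMMAS AND PROOFS =====

-- ===== VERDICT (by name: the statement is the Claim_ definition above) =====
theorem Child_spec : Claim_equal_Child := by
  intro root _
  unfold Spec_Child
  by_cases h0 : root = 0
  · subst h0; decide
  by_cases h1 : root = 1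
  · subst h1; decide
  by_cases h2 : root = 2
  · subst h2; decide
  by_cases h3 : root = 3
  · subst h3; decide
  by_cases h5 : root = 5
  · subst h5; decide
  simp [Child, Child_alt, childGo, List.range_succ, ArrA, ArrB, idxTable,
    PySem.List.pyRange, PySem.List.pyGet?, PySem.List.pyIdx?, PySem.List.enumerate,
    PySem.List.slice, PySem.Dict.getD, PySem.Dict.get?,
    PySem.Dict.insert, PySem.Dict.empty, beq_iff_eq, Ne.symm h0, Ne.symm h1, Ne.symm h2, Ne.symm h3, Ne.symm h5]
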